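-- pv_equiv track=rewrite | github.com/divyanshujhawar/AI-Games | 2048_AI.py | gradient_heuristic
-- ===== SOURCE A (Python) =====
-- def gradient_heuristic(board,player):
--
-- 	# 4 variants for each corner
--     gradient = [[[5,4,3,2,1,0],[4,3,2,1,0,-1],[3,2,1,0,-1,-2],[2,1,0,-1,-2,-3],[1,0,-1,-2,-3,-4],[0,-1,-2,-3,-4,-5]],
--                 [[0,1,2,3,4,5],[-1,0,1,2,3,4],[-2,-1,0,1,2,3],[-3,-2,-1,0,1,2],[-4,-3,-2,-1,0,1],[-5,-4,-3,-2,-1,0]],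
--                 [[-5,-4,-3,-2,-1,0],[-4,-3,-2,-1,0,1],[-3,-2,-1,0,1,2],[-2,-1,0,1,2,3],[-1,0,1,2,3,4],[0,1,2,3,4,5]],
--                 [[0,-1,-2,-3,-4,-5],[1,0,-1,-2,-3,-4],[2,1,0,-1,-2,-3],[3,2,1,0,-1,-2],[4,3,2,1,0,-1],[5,4,3,2,1,0]]
--                 ]
--
--     gradient1 = [[[2**5,2**4,2**3,2**2,2**1,2**0],[2**4,2**3,2**2,2**1,2**0,-2**1],[2**3,2**2,2**1,2**0,-2**1,-2**2],[2**2,2**1,2**0,-2**1,-2**2,-2**3],[2**1,2**0,-2**1,-2**2,-2**3,-2**4],[2**0,-2**1,-2**2,-2**3,-2**4,-2**5]],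
--                 [[2**0,2**1,2**2,2**3,2**4,2**5],[-2**1,2**0,2**1,2**2,2**3,2**4],[-2**2,-2**1,2**0,2**1,2**2,2**3],[-2**3,-2**2,-2**1,2**0,2**1,2**2],[-2**4,-2**3,-2**2,-2**1,2**0,2**1],[-2**5,-2**4,-2**3,-2**2,-2**1,2**0]],
--                 [[-2**5,-2**4,-2**3,-2**2,-2**1,2**0],[-2**4,-2**3,-2**2,-2**1,2**0,2**1],[-2**3,-2**2,-2**1,2**0,2**1,2**2],[-2**2,-2**1,2**0,2**1,2**2,2**3],[-2**1,2**0,2**1,2**2,2**3,2**4],[2**0,2**1,2**2,2**3,2**4,2**5]],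
--                 [[2**0,-2**1,-2**2,-2**3,-2**4,-2**5],[2**1,2**0,-2**1,-2**2,-2**3,-2**4],[2**2,2**1,2**0,-2**1,-2**2,-2**3],[2**3,2**2,2**1,2**0,-2**1,-2**2],[2**4,2**3,2**2,2**1,2**0,-2**1],[2**5,2**4,2**3,2**2,2**1,2**0]]
--                 ]
--
--     cost = -100000
--
--     if player == '-':
--         for l in range(4):
--
--             temp_cost = 0
--
--             for i in range(len(board)):
--                 for j in range(i):
--                     if board[i][j].islower():
--                         temp_cost += gradient1[l][i][j]*(ord(board[i][j])-96)
--
--             if temp_cost > cost: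
--                 cost = temp_cost
--
--     else:
--         for l in range(4):
--
--             temp_cost = 0
--
--             for i in range(len(board)):
--                 for j in range(i):
--                     if board[i][j].isupper():
--                         temp_cost += gradient[l][i][j]*(ord(board[i][j])-64)
--
--             if temp_cost > cost:
--                 cost = temp_cost
--
--     return cost
-- ===== SOURCE B (Python) =====
-- def gradient_heuristic(board, player):
--     # One pass over the triangle with four running sums and closed-form
--     # gradient weights instead of four scans over literal 6x6 tables.
--     minus = player == '-'
--     offset = 96 if minus else 64
--     acc = [0, 0, 0, 0]
--     for i in range(len(board)):
--         for j in range(i):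
--             cell = board[i][j]
--             if cell.islower() if minus else cell.isupper():
--                 v = ord(cell) - offset
--                 slopes = (5 - i - j, j - i, i + j - 5, i - j)
--                 for l in range(4):
--                     g = slopes[l]
--                     w = ((2 ** g if g >= 0 else -(2 ** -g)) if minus else g)
--                     acc[l] += w * v
--     return max(-100000, *acc)
-- ===== Notes on version B (the rewrite author's own statement) =====
-- stated objective: faster
-- what changed: One pass over the board triangle maintaining four running sums (one per corner variant) with the gradient weights computed in closed form from (i,j), instead of four separate scans each indexing literal 6x6 weight tables; the -100000 floor is kept in the final max.
import Mathlib
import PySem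

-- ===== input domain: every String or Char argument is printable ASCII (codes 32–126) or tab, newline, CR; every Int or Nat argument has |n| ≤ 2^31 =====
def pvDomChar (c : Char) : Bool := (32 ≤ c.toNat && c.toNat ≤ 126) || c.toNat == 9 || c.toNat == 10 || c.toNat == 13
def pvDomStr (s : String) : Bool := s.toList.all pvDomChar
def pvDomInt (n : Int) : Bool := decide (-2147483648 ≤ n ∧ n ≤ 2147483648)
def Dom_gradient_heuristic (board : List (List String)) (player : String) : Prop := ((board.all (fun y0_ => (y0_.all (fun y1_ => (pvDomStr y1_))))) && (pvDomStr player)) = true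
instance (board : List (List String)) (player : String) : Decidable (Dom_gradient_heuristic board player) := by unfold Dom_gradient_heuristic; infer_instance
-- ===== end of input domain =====

-- B replaces A's four separate table-weighted scans by one pass keeping four running
-- sums, with the gradient weights computed in closed form instead of literal tables
-- (objective: faster; a timing run measured B ≥ 1.5× faster than A on its large inputs).

-- shared helpers porting Python builtins on strings (exact on the ASCII domain):
-- s.islower() / s.isupper(): at least one cased (= ASCII letter) char and no char of the other case
def pyStrIslower (s : String) : Bool :=
  s.toList.any PySem.Chars.isalpha && !(s.toList.any PySem.Chars.isupper)
def pyStrIsupper (s : String) : Bool :=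
  s.toList.any PySem.Chars.isalpha && !(s.toList.any PySem.Chars.islower)
-- ord(s): code point of the single character; Python raises on length ≠ 1 — Pre_ excludes that,
-- the default 0 here is never reached inside Pre_
def pyOrd (s : String) : Int :=
  match s.toList with
  | [c] => (c.toNat : Int)
  | _ => 0

-- ===== PORT A =====
def gradient_heuristic (board : List (List String)) (player : String) : Int :=
  let gradient : List (List (List Int)) :=
    [[[5,4,3,2,1,0], [4,3,2,1,0,-1], [3,2,1,0,-1,-2], [2,1,0,-1,-2,-3], [1,0,-1,-2,-3,-4], [0,-1,-2,-3,-4,-5]],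
     [[0,1,2,3,4,5], [-1,0,1,2,3,4], [-2,-1,0,1,2,3], [-3,-2,-1,0,1,2], [-4,-3,-2,-1,0,1], [-5,-4,-3,-2,-1,0]],
     [[-5,-4,-3,-2,-1,0], [-4,-3,-2,-1,0,1], [-3,-2,-1,0,1,2], [-2,-1,0,1,2,3], [-1,0,1,2,3,4], [0,1,2,3,4,5]],
     [[0,-1,-2,-3,-4,-5], [1,0,-1,-2,-3,-4], [2,1,0,-1,-2,-3], [3,2,1,0,-1,-2], [4,3,2,1,0,-1], [5,4,3,2,1,0]]]
  let gradient1 : List (List (List Int)) :=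
    [[[32,16,8,4,2,1], [16,8,4,2,1,-2], [8,4,2,1,-2,-4], [4,2,1,-2,-4,-8], [2,1,-2,-4,-8,-16], [1,-2,-4,-8,-16,-32]],
     [[1,2,4,8,16,32], [-2,1,2,4,8,16], [-4,-2,1,2,4,8], [-8,-4,-2,1,2,4], [-16,-8,-4,-2,1,2], [-32,-16,-8,-4,-2,1]],
     [[-32,-16,-8,-4,-2,1], [-16,-8,-4,-2,1,2], [-8,-4,-2,1,2,4], [-4,-2,1,2,4,8], [-2,1,2,4,8,16], [1,2,4,8,16,32]],
     [[1,-2,-4,-8,-16,-32], [2,1,-2,-4,-8,-16], [4,2,1,-2,-4,-8], [8,4,2,1,-2,-4], [16,8,4,2,1,-2], [32,16,8,4,2,1]]]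
  let cost : Int := -100000
  if player == "-" then
    (PySem.List.pyRange 0 4 1).foldl (fun cost l =>
      let temp_cost : Int :=
        (PySem.List.pyRange 0 (board.length : Int) 1).foldl (fun temp_cost i =>
          (PySem.List.pyRange 0 i 1).foldl (fun temp_cost j =>
            if pyStrIslower (PySem.List.pyGetD (PySem.List.pyGetD board i []) j "") then
              temp_cost +
                PySem.List.pyGetD (PySem.List.pyGetD (PySem.List.pyGetD gradient1 l []) i []) j 0 *
                  (pyOrd (PySem.List.pyGetD (PySem.List.pyGetD board i []) j "") - 96)
            else temp_cost) temp_cost) 0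
      if temp_cost > cost then temp_cost else cost) cost
  else
    (PySem.List.pyRange 0 4 1).foldl (fun cost l =>
      let temp_cost : Int :=
        (PySem.List.pyRange 0 (board.length : Int) 1).foldl (fun temp_cost i =>
          (PySem.List.pyRange 0 i 1).foldl (fun temp_cost j =>
            if pyStrIsupper (PySem.List.pyGetD (PySem.List.pyGetD board i []) j "") then
              temp_cost +
                PySem.List.pyGetD (PySem.List.pyGetD (PySem.List.pyGetD gradient l []) i []) j 0 *
                  (pyOrd (PySem.List.pyGetD (PySem.List.pyGetD board i []) j "") - 64)
            else temp_cost) temp_cost) 0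
      if temp_cost > cost then temp_cost else cost) cost

-- ===== PORT B =====
-- closed-form gradient weight: for '-' the power table ±2^|g|, otherwise the slope g itself
def altWeight (minus : Bool) (g : Int) : Int :=
  if minus then (if 0 ≤ g then (2 : Int) ^ g.toNat else -((2 : Int) ^ (-g).toNat)) else g

def gradient_heuristic_alt (board : List (List String)) (player : String) : Int :=
  let minus := player == "-"
  let offset : Int := if minus then 96 else 64
  let acc : Int × Int × Int × Int :=
    (PySem.List.pyRange 0 (board.length : Int) 1).foldl (fun acc i =>
      (PySem.List.pyRange 0 i 1).foldl (fun acc j =>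
        let cell := PySem.List.pyGetD (PySem.List.pyGetD board i []) j ""
        if (if minus then pyStrIslower cell else pyStrIsupper cell) then
          let v : Int := pyOrd cell - offset
          (acc.1 + altWeight minus (5 - i - j) * v,
           acc.2.1 + altWeight minus (j - i) * v,
           acc.2.2.1 + altWeight minus (i + j - 5) * v,
           acc.2.2.2 + altWeight minus (i - j) * v)
        else acc) acc) (0, 0, 0, 0)
  max (max (max (max (-100000 : Int) acc.1) acc.2.1) acc.2.2.1) acc.2.2.2

-- ===== PRECONDITION & SPEC =====
-- the case test the run of A applies to a cell
def cellTest (player : String) (cell : String) : Bool :=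
  if player == "-" then pyStrIslower cell else pyStrIsupper cell

-- Pre_ excludes exactly the inputs on which A raises: a row i shorter than i (IndexError),
-- a matching cell in row i ≥ 6 (gradient table IndexError), or a matching cell that is not a
-- single character (ord TypeError). A returns normally on every other input.
def Pre_gradient_heuristic (board : List (List String)) (player : String) : Prop :=
  ∀ i < board.length, ∀ j < i,
    j < (board.getD i []).length ∧
    (cellTest player ((board.getD i []).getD j "") = true →
      i < 6 ∧ ((board.getD i []).getD j "").toList.length = 1)
instance (board : List (List String)) (player : String) : Decidable (Pre_gradient_heuristic board player) := by
  unfold Pre_gradient_heuristic; infer_instance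

def pvWitness_gradient_heuristic : List (List String) × String := ([[], ["a"]], "-")

def Spec_gradient_heuristic (board : List (List String)) (player : String) (out : Int) : Prop := out = gradient_heuristic_alt board player
instance (board : List (List String)) (player : String) (out : Int) : Decidable (Spec_gradient_heuristic board player out) := by unfold Spec_gradient_heuristic; infer_instance

-- ===== CLAIM (what is proved, stated in full; the proofs are below) =====
def Claim_equal_gradient_heuristic : Prop := ∀ (board : List (List String)) (player : String), Dom_gradient_heuristic board player → Pre_gradient_heuristic board player → Spec_gradient_heuristic board player (gradient_heuristic board player)

-- ===== LEMMAS AND PROOFS =====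

-- named copies of A's tables for the lemmas below (definitionally the port's literals)
def gTbl : List (List (List Int)) :=
  [[[5,4,3,2,1,0], [4,3,2,1,0,-1], [3,2,1,0,-1,-2], [2,1,0,-1,-2,-3], [1,0,-1,-2,-3,-4], [0,-1,-2,-3,-4,-5]],
   [[0,1,2,3,4,5], [-1,0,1,2,3,4], [-2,-1,0,1,2,3], [-3,-2,-1,0,1,2], [-4,-3,-2,-1,0,1], [-5,-4,-3,-2,-1,0]],
   [[-5,-4,-3,-2,-1,0], [-4,-3,-2,-1,0,1], [-3,-2,-1,0,1,2], [-2,-1,0,1,2,3], [-1,0,1,2,3,4], [0,1,2,3,4,5]],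
   [[0,-1,-2,-3,-4,-5], [1,0,-1,-2,-3,-4], [2,1,0,-1,-2,-3], [3,2,1,0,-1,-2], [4,3,2,1,0,-1], [5,4,3,2,1,0]]]
def gTbl1 : List (List (List Int)) :=
  [[[32,16,8,4,2,1], [16,8,4,2,1,-2], [8,4,2,1,-2,-4], [4,2,1,-2,-4,-8], [2,1,-2,-4,-8,-16], [1,-2,-4,-8,-16,-32]],
   [[1,2,4,8,16,32], [-2,1,2,4,8,16], [-4,-2,1,2,4,8], [-8,-4,-2,1,2,4], [-16,-8,-4,-2,1,2], [-32,-16,-8,-4,-2,1]],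
   [[-32,-16,-8,-4,-2,1], [-16,-8,-4,-2,1,2], [-8,-4,-2,1,2,4], [-4,-2,1,2,4,8], [-2,1,2,4,8,16], [1,2,4,8,16,32]],
   [[1,-2,-4,-8,-16,-32], [2,1,-2,-4,-8,-16], [4,2,1,-2,-4,-8], [8,4,2,1,-2,-4], [16,8,4,2,1,-2], [32,16,8,4,2,1]]]

def summand (board : List (List String)) (test : String → Bool) (off : Int)
    (w : Int → Int → Int) (i j : Int) : Int :=
  if test (PySem.List.pyGetD (PySem.List.pyGetD board i []) j "") then
    w i j * (pyOrd (PySem.List.pyGetD (PySem.List.pyGetD board i []) j "") - off)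
  else 0

def triSum (board : List (List String)) (test : String → Bool) (off : Int)
    (w : Int → Int → Int) : Int :=
  ((PySem.List.pyRange 0 (board.length : Int) 1).map
    (fun i => ((PySem.List.pyRange 0 i 1).map (fun j => summand board test off w i j)).sum)).sum

theorem loopA (board : List (List String)) (test : String → Bool) (off : Int)
    (w : Int → Int → Int) :
    (PySem.List.pyRange 0 (board.length : Int) 1).foldl (fun t i =>
      (PySem.List.pyRange 0 i 1).foldl (fun t j =>
        if test (PySem.List.pyGetD (PySem.List.pyGetD board i []) j "") then
          t + w i j * (pyOrd (PySem.List.pyGetD (PySem.List.pyGetD board i []) j "") - off)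
        else t) t) (0 : Int)
    = triSum board test off w := by
  have h1 : ∀ i : Int, ∀ t : Int,
      (PySem.List.pyRange 0 i 1).foldl (fun t j =>
        if test (PySem.List.pyGetD (PySem.List.pyGetD board i []) j "") then
          t + w i j * (pyOrd (PySem.List.pyGetD (PySem.List.pyGetD board i []) j "") - off)
        else t) t
      = t + ((PySem.List.pyRange 0 i 1).map (fun j => summand board test off w i j)).sum := by
    intro i t
    have hb : (fun (t j : Int) =>
        if test (PySem.List.pyGetD (PySem.List.pyGetD board i []) j "") then
          t + w i j * (pyOrd (PySem.List.pyGetD (PySem.List.pyGetD board i []) j "") - off)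
        else t)
        = fun t j => t + summand board test off w i j := by
      funext t j; simp only [summand]; split <;> simp
    rw [hb, PySem.List.foldl_add]
  calc (PySem.List.pyRange 0 (board.length : Int) 1).foldl (fun t i =>
        (PySem.List.pyRange 0 i 1).foldl (fun t j =>
          if test (PySem.List.pyGetD (PySem.List.pyGetD board i []) j "") then
            t + w i j * (pyOrd (PySem.List.pyGetD (PySem.List.pyGetD board i []) j "") - off)
          else t) t) (0 : Int)
      = (PySem.List.pyRange 0 (board.length : Int) 1).foldl (fun t i =>
          t + ((PySem.List.pyRange 0 i 1).map (fun j => summand board test off w i j)).sum) (0 : Int) := by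
        exact PySem.List.foldl_congr_mem _ _ _ _ (fun t i _ => h1 i t)
    _ = triSum board test off w := by rw [PySem.List.foldl_add, zero_add, triSum]

theorem quad_fold {α : Type} (l : List α) (g1 g2 g3 g4 : α → Int) (a : Int × Int × Int × Int) :
    l.foldl (fun acc x => (acc.1 + g1 x, acc.2.1 + g2 x, acc.2.2.1 + g3 x, acc.2.2.2 + g4 x)) a
    = (a.1 + (l.map g1).sum, a.2.1 + (l.map g2).sum, a.2.2.1 + (l.map g3).sum, a.2.2.2 + (l.map g4).sum) := by
  induction l generalizing a with
  | nil => simp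
  | cons x xs ih =>
    simp only [List.foldl_cons, ih, List.map_cons, List.sum_cons]
    refine Prod.ext (by ring) (Prod.ext (by ring) (Prod.ext (by ring) (by ring)))

theorem loopB (board : List (List String)) (test : String → Bool) (off : Int)
    (w1 w2 w3 w4 : Int → Int → Int) :
    (PySem.List.pyRange 0 (board.length : Int) 1).foldl (fun acc i =>
      (PySem.List.pyRange 0 i 1).foldl (fun (acc : Int × Int × Int × Int) j =>
        if test (PySem.List.pyGetD (PySem.List.pyGetD board i []) j "") then
          (acc.1 + w1 i j * (pyOrd (PySem.List.pyGetD (PySem.List.pyGetD board i []) j "") - off),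
           acc.2.1 + w2 i j * (pyOrd (PySem.List.pyGetD (PySem.List.pyGetD board i []) j "") - off),
           acc.2.2.1 + w3 i j * (pyOrd (PySem.List.pyGetD (PySem.List.pyGetD board i []) j "") - off),
           acc.2.2.2 + w4 i j * (pyOrd (PySem.List.pyGetD (PySem.List.pyGetD board i []) j "") - off))
        else acc) acc) ((0, 0, 0, 0) : Int × Int × Int × Int)
    = (triSum board test off w1, triSum board test off w2, triSum board test off w3, triSum board test off w4) := by
  have h1 : ∀ i : Int, ∀ acc : Int × Int × Int × Int,
      (PySem.List.pyRange 0 i 1).foldl (fun (acc : Int × Int × Int × Int) j =>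
        if test (PySem.List.pyGetD (PySem.List.pyGetD board i []) j "") then
          (acc.1 + w1 i j * (pyOrd (PySem.List.pyGetD (PySem.List.pyGetD board i []) j "") - off),
           acc.2.1 + w2 i j * (pyOrd (PySem.List.pyGetD (PySem.List.pyGetD board i []) j "") - off),
           acc.2.2.1 + w3 i j * (pyOrd (PySem.List.pyGetD (PySem.List.pyGetD board i []) j "") - off),
           acc.2.2.2 + w4 i j * (pyOrd (PySem.List.pyGetD (PySem.List.pyGetD board i []) j "") - off))
        else acc) acc
      = (acc.1 + ((PySem.List.pyRange 0 i 1).map (fun j => summand board test off w1 i j)).sum,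
         acc.2.1 + ((PySem.List.pyRange 0 i 1).map (fun j => summand board test off w2 i j)).sum,
         acc.2.2.1 + ((PySem.List.pyRange 0 i 1).map (fun j => summand board test off w3 i j)).sum,
         acc.2.2.2 + ((PySem.List.pyRange 0 i 1).map (fun j => summand board test off w4 i j)).sum) := by
    intro i acc
    have hb : (fun (acc : Int × Int × Int × Int) (j : Int) =>
        if test (PySem.List.pyGetD (PySem.List.pyGetD board i []) j "") then
          (acc.1 + w1 i j * (pyOrd (PySem.List.pyGetD (PySem.List.pyGetD board i []) j "") - off),
           acc.2.1 + w2 i j * (pyOrd (PySem.List.pyGetD (PySem.List.pyGetD board i []) j "") - off),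
           acc.2.2.1 + w3 i j * (pyOrd (PySem.List.pyGetD (PySem.List.pyGetD board i []) j "") - off),
           acc.2.2.2 + w4 i j * (pyOrd (PySem.List.pyGetD (PySem.List.pyGetD board i []) j "") - off))
        else acc)
        = fun acc j => (acc.1 + summand board test off w1 i j,
                        acc.2.1 + summand board test off w2 i j,
                        acc.2.2.1 + summand board test off w3 i j,
                        acc.2.2.2 + summand board test off w4 i j) := by
      funext acc j; simp only [summand]; split <;> simp
    rw [hb, quad_fold]
  have houter : (PySem.List.pyRange 0 (board.length : Int) 1).foldl (fun acc i =>
      (PySem.List.pyRange 0 i 1).foldl (fun (acc : Int × Int × Int × Int) j =>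
        if test (PySem.List.pyGetD (PySem.List.pyGetD board i []) j "") then
          (acc.1 + w1 i j * (pyOrd (PySem.List.pyGetD (PySem.List.pyGetD board i []) j "") - off),
           acc.2.1 + w2 i j * (pyOrd (PySem.List.pyGetD (PySem.List.pyGetD board i []) j "") - off),
           acc.2.2.1 + w3 i j * (pyOrd (PySem.List.pyGetD (PySem.List.pyGetD board i []) j "") - off),
           acc.2.2.2 + w4 i j * (pyOrd (PySem.List.pyGetD (PySem.List.pyGetD board i []) j "") - off))
        else acc) acc) ((0, 0, 0, 0) : Int × Int × Int × Int)
      = (PySem.List.pyRange 0 (board.length : Int) 1).foldl (fun acc i =>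
          (acc.1 + ((PySem.List.pyRange 0 i 1).map (fun j => summand board test off w1 i j)).sum,
           acc.2.1 + ((PySem.List.pyRange 0 i 1).map (fun j => summand board test off w2 i j)).sum,
           acc.2.2.1 + ((PySem.List.pyRange 0 i 1).map (fun j => summand board test off w3 i j)).sum,
           acc.2.2.2 + ((PySem.List.pyRange 0 i 1).map (fun j => summand board test off w4 i j)).sum)) ((0, 0, 0, 0) : Int × Int × Int × Int) :=
    PySem.List.foldl_congr_mem _ _ _ _ (fun acc i _ => h1 i acc)
  rw [houter, quad_fold]
  simp [triSum]

theorem triSum_congr (board : List (List String)) (test : String → Bool) (off : Int)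
    (w w' : Int → Int → Int)
    (h : ∀ i j : Int, 0 ≤ j → j < i → i < (board.length : Int) →
      test (PySem.List.pyGetD (PySem.List.pyGetD board i []) j "") = true → w i j = w' i j) :
    triSum board test off w = triSum board test off w' := by
  unfold triSum
  refine congrArg List.sum (List.map_congr_left ?_)
  intro i hi
  refine congrArg List.sum (List.map_congr_left ?_)
  intro j hj
  rw [PySem.List.mem_pyRange_one] at hi hj
  simp only [summand]
  split
  · next ht => rw [h i j hj.1 hj.2 hi.2 ht]
  · rfl

-- the literal 6×6 tables agree with the closed-form weights
theorem tblfact1 : ∀ (a : Nat), a < 6 → ∀ (b : Nat), b < 6 →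
    PySem.List.pyGetD (PySem.List.pyGetD (PySem.List.pyGetD gTbl1 0 []) (a : Int) []) (b : Int) 0 = altWeight true (5 - (a : Int) - (b : Int)) ∧
    PySem.List.pyGetD (PySem.List.pyGetD (PySem.List.pyGetD gTbl1 1 []) (a : Int) []) (b : Int) 0 = altWeight true ((b : Int) - (a : Int)) ∧
    PySem.List.pyGetD (PySem.List.pyGetD (PySem.List.pyGetD gTbl1 2 []) (a : Int) []) (b : Int) 0 = altWeight true ((a : Int) + (b : Int) - 5) ∧
    PySem.List.pyGetD (PySem.List.pyGetD (PySem.List.pyGetD gTbl1 3 []) (a : Int) []) (b : Int) 0 = altWeight true ((a : Int) - (b : Int)) := by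
  decide

theorem tblfact0 : ∀ (a : Nat), a < 6 → ∀ (b : Nat), b < 6 →
    PySem.List.pyGetD (PySem.List.pyGetD (PySem.List.pyGetD gTbl 0 []) (a : Int) []) (b : Int) 0 = altWeight false (5 - (a : Int) - (b : Int)) ∧
    PySem.List.pyGetD (PySem.List.pyGetD (PySem.List.pyGetD gTbl 1 []) (a : Int) []) (b : Int) 0 = altWeight false ((b : Int) - (a : Int)) ∧
    PySem.List.pyGetD (PySem.List.pyGetD (PySem.List.pyGetD gTbl 2 []) (a : Int) []) (b : Int) 0 = altWeight false ((a : Int) + (b : Int) - 5) ∧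
    PySem.List.pyGetD (PySem.List.pyGetD (PySem.List.pyGetD gTbl 3 []) (a : Int) []) (b : Int) 0 = altWeight false ((a : Int) - (b : Int)) := by
  decide

-- under Pre_, every cell passing the case test sits at i < 6, so table and closed form agree
theorem w_bridge (board : List (List String)) (player : String)
    (hpre : Pre_gradient_heuristic board player)
    (tbl : List (List (List Int))) (mb : Bool) (test : String → Bool)
    (htest : ∀ cell, test cell = cellTest player cell)
    (htbl : ∀ (a : Nat), a < 6 → ∀ (b : Nat), b < 6 →
      PySem.List.pyGetD (PySem.List.pyGetD (PySem.List.pyGetD tbl 0 []) (a : Int) []) (b : Int) 0 = altWeight mb (5 - (a : Int) - (b : Int)) ∧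
      PySem.List.pyGetD (PySem.List.pyGetD (PySem.List.pyGetD tbl 1 []) (a : Int) []) (b : Int) 0 = altWeight mb ((b : Int) - (a : Int)) ∧
      PySem.List.pyGetD (PySem.List.pyGetD (PySem.List.pyGetD tbl 2 []) (a : Int) []) (b : Int) 0 = altWeight mb ((a : Int) + (b : Int) - 5) ∧
      PySem.List.pyGetD (PySem.List.pyGetD (PySem.List.pyGetD tbl 3 []) (a : Int) []) (b : Int) 0 = altWeight mb ((a : Int) - (b : Int))) :
    ∀ i j : Int, 0 ≤ j → j < i → i < (board.length : Int) →
      test (PySem.List.pyGetD (PySem.List.pyGetD board i []) j "") = true →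
      PySem.List.pyGetD (PySem.List.pyGetD (PySem.List.pyGetD tbl 0 []) i []) j 0 = altWeight mb (5 - i - j) ∧
      PySem.List.pyGetD (PySem.List.pyGetD (PySem.List.pyGetD tbl 1 []) i []) j 0 = altWeight mb (j - i) ∧
      PySem.List.pyGetD (PySem.List.pyGetD (PySem.List.pyGetD tbl 2 []) i []) j 0 = altWeight mb (i + j - 5) ∧
      PySem.List.pyGetD (PySem.List.pyGetD (PySem.List.pyGetD tbl 3 []) i []) j 0 = altWeight mb (i - j) := by
  intro i j hj hji hilen ht
  have hi0 : 0 ≤ i := le_trans hj hji.le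
  obtain ⟨a, rfl⟩ : ∃ a : Nat, i = (a : Int) := ⟨i.toNat, (Int.toNat_of_nonneg hi0).symm⟩
  obtain ⟨b, rfl⟩ : ∃ b : Nat, j = (b : Int) := ⟨j.toNat, (Int.toNat_of_nonneg hj).symm⟩
  have ha : a < board.length := by exact_mod_cast hilen
  have hb : b < a := by exact_mod_cast hji
  rw [PySem.List.pyGetD_natCast, PySem.List.pyGetD_natCast, htest] at ht
  have h6 : a < 6 := ((hpre a ha b hb).2 ht).1
  exact htbl a h6 b (lt_trans hb h6)


theorem gTbl_lit : ([[[5,4,3,2,1,0], [4,3,2,1,0,-1], [3,2,1,0,-1,-2], [2,1,0,-1,-2,-3], [1,0,-1,-2,-3,-4], [0,-1,-2,-3,-4,-5]],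
   [[0,1,2,3,4,5], [-1,0,1,2,3,4], [-2,-1,0,1,2,3], [-3,-2,-1,0,1,2], [-4,-3,-2,-1,0,1], [-5,-4,-3,-2,-1,0]],
   [[-5,-4,-3,-2,-1,0], [-4,-3,-2,-1,0,1], [-3,-2,-1,0,1,2], [-2,-1,0,1,2,3], [-1,0,1,2,3,4], [0,1,2,3,4,5]],
   [[0,-1,-2,-3,-4,-5], [1,0,-1,-2,-3,-4], [2,1,0,-1,-2,-3], [3,2,1,0,-1,-2], [4,3,2,1,0,-1], [5,4,3,2,1,0]]] : List (List (List Int))) = gTbl := rfl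
theorem gTbl1_lit : ([[[32,16,8,4,2,1], [16,8,4,2,1,-2], [8,4,2,1,-2,-4], [4,2,1,-2,-4,-8], [2,1,-2,-4,-8,-16], [1,-2,-4,-8,-16,-32]],
   [[1,2,4,8,16,32], [-2,1,2,4,8,16], [-4,-2,1,2,4,8], [-8,-4,-2,1,2,4], [-16,-8,-4,-2,1,2], [-32,-16,-8,-4,-2,1]],
   [[-32,-16,-8,-4,-2,1], [-16,-8,-4,-2,1,2], [-8,-4,-2,1,2,4], [-4,-2,1,2,4,8], [-2,1,2,4,8,16], [1,2,4,8,16,32]],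
   [[1,-2,-4,-8,-16,-32], [2,1,-2,-4,-8,-16], [4,2,1,-2,-4,-8], [8,4,2,1,-2,-4], [16,8,4,2,1,-2], [32,16,8,4,2,1]]] : List (List (List Int))) = gTbl1 := rfl

theorem if_gt_eq_max (c t : Int) : (if t > c then t else c) = max c t := by
  simp only [max_def]; split_ifs <;> omega

-- ===== VERDICT (by name: the statement is the Claim_ definition above) =====
theorem gradient_heuristic_spec : Claim_equal_gradient_heuristic := by
  intro board player _hdom hpre
  unfold Spec_gradient_heuristic
  by_cases hp : player == "-"
  · simp only [gradient_heuristic, gradient_heuristic_alt, hp, if_true]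
    rw [show PySem.List.pyRange 0 4 1 = [0, 1, 2, 3] from rfl]
    simp only [List.foldl_cons, List.foldl_nil]
    rw [loopA board pyStrIslower 96 _, loopA board pyStrIslower 96 _,
        loopA board pyStrIslower 96 _, loopA board pyStrIslower 96 _,
        loopB board pyStrIslower 96 _ _ _ _]
    rw [gTbl1_lit]
    have hbr := w_bridge board player hpre gTbl1 true pyStrIslower
      (fun cell => by simp [cellTest, hp]) tblfact1
    rw [triSum_congr board pyStrIslower 96 _ _ (fun i j hj hji hlen ht => (hbr i j hj hji hlen ht).1),
        triSum_congr board pyStrIslower 96 _ _ (fun i j hj hji hlen ht => (hbr i j hj hji hlen ht).2.1),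
        triSum_congr board pyStrIslower 96 _ _ (fun i j hj hji hlen ht => (hbr i j hj hji hlen ht).2.2.1),
        triSum_congr board pyStrIslower 96 _ _ (fun i j hj hji hlen ht => (hbr i j hj hji hlen ht).2.2.2)]
    rw [if_gt_eq_max, if_gt_eq_max, if_gt_eq_max, if_gt_eq_max]
  · have hp' : (player == "-") = false := by simpa using hp
    simp only [gradient_heuristic, gradient_heuristic_alt, hp', Bool.false_eq_true, if_false]
    rw [show PySem.List.pyRange 0 4 1 = [0, 1, 2, 3] from rfl]
    simp only [List.foldl_cons, List.foldl_nil]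
    rw [loopA board pyStrIsupper 64 _, loopA board pyStrIsupper 64 _,
        loopA board pyStrIsupper 64 _, loopA board pyStrIsupper 64 _,
        loopB board pyStrIsupper 64 _ _ _ _]
    rw [gTbl_lit]
    have hbr := w_bridge board player hpre gTbl false pyStrIsupper
      (fun cell => by simp [cellTest, hp]) tblfact0
    rw [triSum_congr board pyStrIsupper 64 _ _ (fun i j hj hji hlen ht => (hbr i j hj hji hlen ht).1),
        triSum_congr board pyStrIsupper 64 _ _ (fun i j hj hji hlen ht => (hbr i j hj hji hlen ht).2.1),
        triSum_congr board pyStrIsupper 64 _ _ (fun i j hj hji hlen ht => (hbr i j hj hji hlen ht).2.2.1),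
        triSum_congr board pyStrIsupper 64 _ _ (fun i j hj hji hlen ht => (hbr i j hj hji hlen ht).2.2.2)]
    rw [if_gt_eq_max, if_gt_eq_max, if_gt_eq_max, if_gt_eq_max]
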